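-- pv_equiv track=rewrite | github.com/xiaoye-hua/machine_learning_learning | scripts/keras_lstm_vae-master/utils.py | vec_to_name
-- ===== SOURCE A (Python) =====
-- def vec_to_name(vec, chars):
--     name = ''
--     for x in vec:
--         char = chars[x]
--         if len(char) == 1:
--             name += char
--         elif char == '<END>':
--             return name
--     return name
-- ===== SOURCE B (Python) =====
-- def vec_to_name(vec, chars):
--     # Stage 1: locate the sentinel -- index of the first '<END>' token (or len(vec)).
--     cut = len(vec)
--     for i, x in enumerate(vec):
--         if chars[x] == '<END>':
--             cut = i
--             break
--     # Stage 2: join the single-character tokens of the prefix before the sentinel.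
--     return ''.join(chars[x] for x in vec[:cut] if len(chars[x]) == 1)
-- ===== Notes on version B (the rewrite author's own statement) =====
-- stated objective: alternative
-- what changed: Replaces A's single accumulator loop with early return by two staged passes: first locate the '<END>' sentinel position, then slice the vector there and join the single-character tokens of that prefix.
import Mathlib
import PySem

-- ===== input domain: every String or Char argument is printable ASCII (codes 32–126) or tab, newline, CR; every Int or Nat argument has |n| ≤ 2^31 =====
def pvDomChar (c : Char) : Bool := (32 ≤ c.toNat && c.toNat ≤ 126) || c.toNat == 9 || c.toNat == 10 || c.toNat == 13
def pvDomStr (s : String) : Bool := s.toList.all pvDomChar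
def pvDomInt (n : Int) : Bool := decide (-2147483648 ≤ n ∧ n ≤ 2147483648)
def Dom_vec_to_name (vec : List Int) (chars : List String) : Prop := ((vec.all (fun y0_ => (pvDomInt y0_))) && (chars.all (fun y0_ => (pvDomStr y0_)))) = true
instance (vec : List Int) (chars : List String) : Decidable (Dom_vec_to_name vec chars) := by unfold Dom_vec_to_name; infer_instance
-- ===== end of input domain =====

-- B replaces A's single accumulator loop (early return at '<END>') by two staged passes:
-- first find the sentinel's position, then join the single-character tokens of the prefix
-- before it (objective: alternative; same return value wherever A returns).

-- ===== PORT A =====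
-- A's loop: accumulator `name`, early return on '<END>'.
def vec_to_name_go (chars : List String) : List Int → String → String
  | [], name => name
  | x :: rest, name =>
    let char := (PySem.List.pyGet? chars x).getD ""   -- chars[x]; none (IndexError) excluded by Pre_
    if PySem.Str.len char = 1 then vec_to_name_go chars rest (name ++ char)
    else if char = "<END>" then name
    else vec_to_name_go chars rest name

def vec_to_name (vec : List Int) (chars : List String) : String :=
  vec_to_name_go chars vec ""

-- ===== PORT B =====
-- Source B stage 1: index of the first position whose token is '<END>' (vec.length if none).
def vec_to_name_alt_cut (chars : List String) : List Int → Nat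
  | [] => 0
  | x :: rest =>
    if ((PySem.List.pyGet? chars x).getD "" : String) = "<END>" then 0
    else vec_to_name_alt_cut chars rest + 1

-- Source B stage 2: slice the vector at the cut, keep single-character tokens, join.
def vec_to_name_alt (vec : List Int) (chars : List String) : String :=
  PySem.Str.join ""
    (((vec.take (vec_to_name_alt_cut chars vec)).map
        (fun x => (PySem.List.pyGet? chars x).getD "")).filter
      (fun t => decide (PySem.Str.len t = 1)))

-- ===== PRECONDITION & SPEC =====
-- Pre_ excludes exactly the inputs on which Python A raises IndexError: the loop stops at the
-- first element that is out of range or maps to '<END>'; A returns normally iff that first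
-- stopping element (if any) is in range.
def pvGood (chars : List String) (x : Int) : Bool :=
  (PySem.List.pyGet? chars x).isSome && ((PySem.List.pyGet? chars x).getD "" != "<END>")

def Pre_vec_to_name (vec : List Int) (chars : List String) : Prop :=
  ((vec.dropWhile (pvGood chars)).head?.all
    (fun x => (PySem.List.pyGet? chars x).isSome)) = true
instance (vec : List Int) (chars : List String) : Decidable (Pre_vec_to_name vec chars) := by
  unfold Pre_vec_to_name; infer_instance

def pvWitness_vec_to_name : List Int × List String := ([0, 2, 1, -1], ["h", "i", "!", "<END>"])

def Spec_vec_to_name (vec : List Int) (chars : List String) (out : String) : Prop := out = vec_to_name_alt vec chars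
instance (vec : List Int) (chars : List String) (out : String) : Decidable (Spec_vec_to_name vec chars out) := by unfold Spec_vec_to_name; infer_instance

-- ===== CLAIM (what is proved, stated in full; the proofs are below) =====
def Claim_equal_vec_to_name : Prop := ∀ (vec : List Int) (chars : List String), Dom_vec_to_name vec chars → Pre_vec_to_name vec chars → Spec_vec_to_name vec chars (vec_to_name vec chars)

-- ===== LEMMAS AND PROOFS =====

theorem chars_join_empty_cons (c : List Char) (l : List (List Char)) :
    PySem.Chars.join [] (c :: l) = c ++ PySem.Chars.join [] l := by
  cases l with
  | nil => simp [PySem.Chars.join_singleton, PySem.Chars.join_nil]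
  | cons b t => simp [PySem.Chars.join_cons_cons]

theorem str_join_empty_nil : PySem.Str.join "" ([] : List String) = "" := by
  apply String.toList_inj.mp
  simp [PySem.Str.toList_join, PySem.Chars.join_nil]

theorem str_join_empty_cons (c : String) (l : List String) :
    PySem.Str.join "" (c :: l) = c ++ PySem.Str.join "" l := by
  apply String.toList_inj.mp
  simp [PySem.Str.toList_join, chars_join_empty_cons]

theorem vec_to_name_go_eq (chars : List String) (l : List Int) (name : String) :
    vec_to_name_go chars l name =
      name ++ PySem.Str.join ""
        (((l.take (vec_to_name_alt_cut chars l)).map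
            (fun x => (PySem.List.pyGet? chars x).getD "")).filter
          (fun t => decide (PySem.Str.len t = 1))) := by
  induction l generalizing name with
  | nil => simp [vec_to_name_go, vec_to_name_alt_cut, str_join_empty_nil, String.append_empty]
  | cons x rest ih =>
    simp only [vec_to_name_go]
    by_cases hend : ((PySem.List.pyGet? chars x).getD "" : String) = "<END>"
    · rw [show vec_to_name_alt_cut chars (x :: rest) = 0 from by
          simp [vec_to_name_alt_cut, hend],
        if_neg (show ¬ PySem.Str.len ((PySem.List.pyGet? chars x).getD "") = 1 by
          rw [hend]; decide),
        if_pos hend, List.take_zero, List.map_nil, List.filter_nil,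
        str_join_empty_nil, String.append_empty]
    · rw [show vec_to_name_alt_cut chars (x :: rest) = vec_to_name_alt_cut chars rest + 1 from by
          simp [vec_to_name_alt_cut, hend],
        List.take_succ_cons, List.map_cons, List.filter_cons]
      by_cases hlen : PySem.Str.len ((PySem.List.pyGet? chars x).getD "") = 1
      · rw [if_pos hlen, ih, if_pos (decide_eq_true hlen), str_join_empty_cons,
          String.append_assoc]
      · rw [if_neg hlen, if_neg hend, ih, if_neg (by simpa using hlen)]

-- ===== VERDICT (by name: the statement is the Claim_ definition above) =====
theorem vec_to_name_spec : Claim_equal_vec_to_name := by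
  intro vec chars _ _
  unfold Spec_vec_to_name vec_to_name vec_to_name_alt
  rw [vec_to_name_go_eq chars vec "", String.empty_append]
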